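-- pv_equiv track=rewrite | github.com/TirthC27/NAVIYA | backend/app/agents/career/skill_extractor_agent.py | _generate_gap_recommendations
-- ===== SOURCE A (Python) =====
-- from typing import Any, Dict, List, Optional
--
-- def _generate_gap_recommendations(gaps: List[Dict]) -> List[Dict]:
--     """Generate recommendations for addressing skill gaps."""
--     recommendations = []
--
--     # Sort gaps by importance
--     priority_order = {"critical": 0, "important": 1, "nice_to_have": 2}
--     sorted_gaps = sorted(gaps, key=lambda x: priority_order.get(x.get("importance", "nice_to_have"), 2))
--
--     for gap in sorted_gaps[:5]:  # Top 5 recommendations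
--         recommendations.append({
--             "skill": gap.get("skill_name"),
--             "priority": gap.get("importance"),
--             "suggestion": f"Consider learning {gap.get('skill_name')} through online courses or projects"
--         })
--
--     return recommendations
-- ===== SOURCE B (Python) =====
-- def _generate_gap_recommendations(gaps):
--     """Generate recommendations for addressing skill gaps."""
--     recs = []
--     # three passes, one per priority level (critical, important, everything else),
--     # formatting matching gaps directly until five recommendations are collected
--     for level in (0, 1, 2):
--         for gap in gaps:
--             imp = gap.get("importance", "nice_to_have")
--             prio = 0 if imp == "critical" else 1 if imp == "important" else 2
--             if len(recs) < 5 and prio == level: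
--                 name = gap.get("skill_name")
--                 recs.append({
--                     "skill": name,
--                     "priority": gap.get("importance"),
--                     "suggestion": f"Consider learning {name} through online courses or projects"
--                 })
--     return recs
-- ===== Notes on version B (the rewrite author's own statement) =====
-- stated objective: alternative
-- what changed: Replaces the comparison sort + slice + formatting loop with three direct passes over the input (one per priority level: critical, important, other) that format matching gaps straight into the result until five recommendations are collected, so no sorted intermediate list is built.
import Mathlib
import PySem

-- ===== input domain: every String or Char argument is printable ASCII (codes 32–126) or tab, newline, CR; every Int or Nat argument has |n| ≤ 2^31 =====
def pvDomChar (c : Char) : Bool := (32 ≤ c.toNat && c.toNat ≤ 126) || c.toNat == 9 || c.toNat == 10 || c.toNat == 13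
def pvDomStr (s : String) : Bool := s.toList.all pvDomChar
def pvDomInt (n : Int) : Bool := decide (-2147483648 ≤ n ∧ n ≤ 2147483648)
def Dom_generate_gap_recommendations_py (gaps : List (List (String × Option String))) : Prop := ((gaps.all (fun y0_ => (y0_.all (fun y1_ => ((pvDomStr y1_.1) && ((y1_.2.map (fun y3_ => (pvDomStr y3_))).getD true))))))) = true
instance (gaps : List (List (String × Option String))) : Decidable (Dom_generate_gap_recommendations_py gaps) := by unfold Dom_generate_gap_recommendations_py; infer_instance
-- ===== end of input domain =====

-- B replaces sort + slice + format loop with three direct passes (one per priority level)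
-- formatting matches into the result until five recommendations are collected; same output.

-- ===== PORT A =====
-- priority_order = {"critical": 0, "important": 1, "nice_to_have": 2}
def pvPrioDict : PySem.Dict String Int :=
  PySem.Dict.ofList [("critical", 0), ("important", 1), ("nice_to_have", 2)]

-- priority_order.get(x.get("importance", "nice_to_have"), 2); a stored None value misses every str key → 2
def pvPrio (gap : List (String × Option String)) : Int :=
  let v : Option String :=
    match (PySem.Dict.mk gap).get? "importance" with
    | none => some "nice_to_have"   -- key absent: Python's default "nice_to_have"
    | some w => w                   -- key present: its value (possibly None)
  match v with
  | some s => pvPrioDict.getD s 2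
  | none => 2                       -- priority_order.get(None, 2) = 2

-- the recommendation dict literal of A's loop body; f"{x}" of an Optional[str] prints "None" for None
def pvFmt (gap : List (String × Option String)) : List (String × Option String) :=
  let sk : Option String := ((PySem.Dict.mk gap).get? "skill_name").getD none
  let imp : Option String := ((PySem.Dict.mk gap).get? "importance").getD none
  [("skill", sk), ("priority", imp),
   ("suggestion", some ("Consider learning " ++ (match sk with | none => "None" | some s => s) ++ " through online courses or projects"))]

def generate_gap_recommendations_py (gaps : List (List (String × Option String))) : List (List (String × Option String)) :=
  let sorted_gaps := PySem.List.sorted gaps pvPrio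
  (PySem.List.slice sorted_gaps none (some 5)).foldl (fun recs gap => recs ++ [pvFmt gap]) []

-- ===== PORT B =====
-- prio = 0 if imp == "critical" else 1 if imp == "important" else 2  (imp = gap.get("importance", "nice_to_have"))
-- (Python's local 'imp' is inlined here: a non-dependent let)
def pvPrioB (gap : List (String × Option String)) : Int :=
  if (PySem.Dict.mk gap).getD "importance" (some "nice_to_have") == some "critical" then 0
  else if (PySem.Dict.mk gap).getD "importance" (some "nice_to_have") == some "important" then 1
  else 2

-- f"{name}": str or the text "None"
def pvShowB : Option String → String
  | none => "None"
  | some s => s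

-- the body of B's inner loop: format the gap into recs if it is at the current level and fewer than 5 collected
def pvCollectB (level : Int) (recs : List (List (String × Option String))) (gap : List (String × Option String)) :
    List (List (String × Option String)) :=
  if recs.length < 5 && pvPrioB gap == level then
    -- (Python's local 'name' = gap.get("skill_name") is inlined)
    recs ++ [[("skill", (PySem.Dict.mk gap).getD "skill_name" none),
              ("priority", (PySem.Dict.mk gap).getD "importance" none),
              ("suggestion", some ("Consider learning " ++ pvShowB ((PySem.Dict.mk gap).getD "skill_name" none)
                 ++ " through online courses or projects"))]]
  else recs

def generate_gap_recommendations_py_alt (gaps : List (List (String × Option String))) : List (List (String × Option String)) :=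
  ([0, 1, 2] : List Int).foldl (fun recs level => gaps.foldl (pvCollectB level) recs) []

-- ===== PRECONDITION & SPEC =====
def Spec_generate_gap_recommendations_py (gaps : List (List (String × Option String))) (out : List (List (String × Option String))) : Prop := out = generate_gap_recommendations_py_alt gaps
instance (gaps : List (List (String × Option String))) (out : List (List (String × Option String))) : Decidable (Spec_generate_gap_recommendations_py gaps out) := by unfold Spec_generate_gap_recommendations_py; infer_instance

-- ===== CLAIM (what is proved, stated in full; the proofs are below) =====
def Claim_equal_generate_gap_recommendations_py : Prop := ∀ (gaps : List (List (String × Option String))), Dom_generate_gap_recommendations_py gaps → Spec_generate_gap_recommendations_py gaps (generate_gap_recommendations_py gaps)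

-- ===== LEMMAS AND PROOFS =====

theorem pvPrioB_eq (gap : List (String × Option String)) : pvPrioB gap = pvPrio gap := by
  unfold pvPrioB pvPrio
  rcases h : (PySem.Dict.mk gap).get? "importance" with _ | (_ | s) <;>
    simp only [PySem.Dict.getD_eq_get?_getD, h, Option.getD_some, Option.getD_none]
  · decide
  · decide
  · by_cases h1 : s = "critical"
    · subst h1; decide
    by_cases h2 : s = "important"
    · subst h2; decide
    by_cases h3 : s = "nice_to_have"
    · subst h3; decide
    have hd : (pvPrioDict.get? s).getD 2 = 2 := by
      rw [show pvPrioDict = PySem.Dict.mk [("critical", 0), ("important", 1), ("nice_to_have", 2)] from by decide]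
      simp only [PySem.Dict.get?_mk_cons]
      rw [if_neg (by simp only [beq_iff_eq]; exact fun e => h1 e.symm),
          if_neg (by simp only [beq_iff_eq]; exact fun e => h2 e.symm),
          if_neg (by simp only [beq_iff_eq]; exact fun e => h3 e.symm)]
      simp [PySem.Dict.get?]
    rw [hd, if_neg (by simp [h1]), if_neg (by simp [h2])]

theorem pvPrio_cases (gap : List (String × Option String)) :
    pvPrio gap = 0 ∨ pvPrio gap = 1 ∨ pvPrio gap = 2 := by
  rw [← pvPrioB_eq]
  unfold pvPrioB
  split_ifs <;> simp

-- insertBy puts x right after a prefix it does not go before, when it goes before the suffix's head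
theorem insertBy_middle {α : Type} (bef : α → α → Bool) (x : α) (p s : List α)
    (hp : ∀ y ∈ p, bef x y = false)
    (hs : ∀ y, s.head? = some y → bef x y = true) :
    PySem.List.insertBy bef x (p ++ s) = p ++ x :: s := by
  induction p with
  | nil =>
    cases s with
    | nil => simp [PySem.List.insertBy]
    | cons y ys =>
      have := hs y (by simp)
      simp [PySem.List.insertBy, this]
  | cons a p ih =>
    have ha := hp a (by simp)
    simp only [List.cons_append, PySem.List.insertBy, ha]
    simp only [Bool.false_eq_true, if_false]
    rw [ih (fun y hy => hp y (by simp [hy]))]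

-- the stable-sort distribution invariant: folding insertBy over xs onto three ordered buckets
theorem sorted_buckets (xs : List (List (String × Option String)))
    (b0 b1 b2 : List (List (String × Option String)))
    (h0 : ∀ y ∈ b0, pvPrio y = 0) (h1 : ∀ y ∈ b1, pvPrio y = 1) (h2 : ∀ y ∈ b2, pvPrio y = 2) :
    xs.foldl (fun acc x => PySem.List.insertBy (fun a b => decide (pvPrio a < pvPrio b)) x acc) (b0 ++ b1 ++ b2)
      = (b0 ++ xs.filter (fun x => pvPrio x == 0))
        ++ (b1 ++ xs.filter (fun x => pvPrio x == 1))
        ++ (b2 ++ xs.filter (fun x => pvPrio x == 2)) := by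
  induction xs generalizing b0 b1 b2 with
  | nil => simp
  | cons x t ih =>
    simp only [List.foldl_cons]
    rcases pvPrio_cases x with hx | hx | hx
    · have : PySem.List.insertBy (fun a b => decide (pvPrio a < pvPrio b)) x (b0 ++ (b1 ++ b2))
          = b0 ++ x :: (b1 ++ b2) := by
        apply insertBy_middle
        · intro y hy; simp [h0 y hy, hx]
        · intro y hy
          rcases List.head?_eq_some_iff.mp hy with ⟨t', ht'⟩
          have hym : y ∈ b1 ++ b2 := by rw [ht']; simp
          rcases List.mem_append.mp hym with h | h
          · simp [h1 y h, hx]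
          · simp [h2 y h, hx]
      have hb : ∀ y ∈ b0 ++ [x], pvPrio y = 0 := by
        intro y hy
        rcases List.mem_append.mp hy with h | h
        · exact h0 y h
        · simp at h; simp [h, hx]
      rw [List.append_assoc, this, (show b0 ++ x :: (b1 ++ b2) = (b0 ++ [x]) ++ b1 ++ b2 by simp),
          ih (b0 ++ [x]) b1 b2 hb h1 h2]
      simp [hx]
    · have : PySem.List.insertBy (fun a b => decide (pvPrio a < pvPrio b)) x ((b0 ++ b1) ++ b2)
          = (b0 ++ b1) ++ x :: b2 := by
        apply insertBy_middle
        · intro y hy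
          rcases List.mem_append.mp hy with h | h
          · simp [h0 y h, hx]
          · simp [h1 y h, hx]
        · intro y hy
          rcases List.head?_eq_some_iff.mp hy with ⟨t', ht'⟩
          have : y ∈ b2 := by rw [ht']; simp
          simp [h2 y this, hx]
      have hb : ∀ y ∈ b1 ++ [x], pvPrio y = 1 := by
        intro y hy
        rcases List.mem_append.mp hy with h | h
        · exact h1 y h
        · simp at h; simp [h, hx]
      rw [this, (show (b0 ++ b1) ++ x :: b2 = b0 ++ (b1 ++ [x]) ++ b2 by simp),
          ih b0 (b1 ++ [x]) b2 h0 hb h2]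
      simp [hx]
    · have : PySem.List.insertBy (fun a b => decide (pvPrio a < pvPrio b)) x ((b0 ++ b1 ++ b2) ++ [])
          = (b0 ++ b1 ++ b2) ++ x :: [] := by
        apply insertBy_middle
        · intro y hy
          rcases List.mem_append.mp hy with h | h
          · rcases List.mem_append.mp h with h' | h'
            · simp [h0 y h', hx]
            · simp [h1 y h', hx]
          · simp [h2 y h, hx]
        · intro y hy; simp at hy
      rw [List.append_nil] at this
      have hb : ∀ y ∈ b2 ++ [x], pvPrio y = 2 := by
        intro y hy
        rcases List.mem_append.mp hy with h | h
        · exact h2 y h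
        · simp at h; simp [h, hx]
      rw [this, (show (b0 ++ b1 ++ b2) ++ [x] = b0 ++ b1 ++ (b2 ++ [x]) by simp),
          ih b0 b1 (b2 ++ [x]) h0 h1 hb]
      simp [hx]

-- the sort by pvPrio is the three filters concatenated
theorem sorted_eq_filters (xs : List (List (String × Option String))) :
    PySem.List.sorted xs pvPrio
      = xs.filter (fun x => pvPrio x == 0) ++ xs.filter (fun x => pvPrio x == 1)
        ++ xs.filter (fun x => pvPrio x == 2) := by
  show xs.foldl (fun acc x => PySem.List.insertBy (fun a b => decide (pvPrio a < pvPrio b)) x acc) [] = _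
  have := sorted_buckets xs [] [] [] (by simp) (by simp) (by simp)
  simpa using this

-- the formatted dict B builds inline is A's pvFmt
theorem collectB_fmt (gap : List (String × Option String)) :
    [("skill", (PySem.Dict.mk gap).getD "skill_name" none),
     ("priority", (PySem.Dict.mk gap).getD "importance" none),
     ("suggestion", some ("Consider learning " ++ pvShowB ((PySem.Dict.mk gap).getD "skill_name" none)
        ++ " through online courses or projects"))] = pvFmt gap := by
  unfold pvFmt pvShowB
  simp only [PySem.Dict.getD_eq_get?_getD]

-- one inner pass of B collects the formatted level-ℓ gaps up to the remaining budget
theorem collectB_pass (xs : List (List (String × Option String))) (ℓ : Int)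
    (recs : List (List (String × Option String))) :
    xs.foldl (pvCollectB ℓ) recs
      = recs ++ ((xs.filter (fun x => pvPrio x == ℓ)).map pvFmt).take (5 - recs.length) := by
  induction xs generalizing recs with
  | nil => simp
  | cons x t ih =>
    simp only [List.foldl_cons, List.filter_cons]
    by_cases hm : pvPrio x = ℓ
    · simp only [hm, beq_self_eq_true, if_true, List.map_cons]
      by_cases hl : recs.length < 5
      · have hstep : pvCollectB ℓ recs x = recs ++ [pvFmt x] := by
          unfold pvCollectB
          rw [if_pos (by simp [pvPrioB_eq, hm, hl]), collectB_fmt]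
        rw [hstep, ih]
        have h5 : 5 - recs.length = (5 - (recs ++ [pvFmt x]).length) + 1 := by
          simp; omega
        rw [h5, List.take_succ_cons]
        simp
      · have h0 : 5 - recs.length = 0 := by omega
        have hstep : pvCollectB ℓ recs x = recs := by
          unfold pvCollectB
          rw [if_neg (by simp [hl])]
        rw [hstep, ih, h0]
        simp
    · have hstep : pvCollectB ℓ recs x = recs := by
        unfold pvCollectB
        rw [if_neg (by simp [pvPrioB_eq, hm])]
      rw [hstep, ih]
      simp [hm]

-- ===== VERDICT (by name: the statement is the Claim_ definition above) =====
theorem generate_gap_recommendations_py_spec : Claim_equal_generate_gap_recommendations_py := by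
  intro gaps _
  show generate_gap_recommendations_py gaps = generate_gap_recommendations_py_alt gaps
  simp only [generate_gap_recommendations_py, generate_gap_recommendations_py_alt,
    sorted_eq_filters, List.foldl_cons, List.foldl_nil, collectB_pass, List.nil_append]
  rw [PySem.List.slice_to _ (by norm_num)]
  rw [PySem.List.foldl_append_singleton_eq_map]
  simp only [List.map_take, List.map_append, List.take_append, List.length_append,
    List.length_take, List.length_map]

  simp only [List.length_nil, Nat.sub_zero, List.nil_append, show Int.toNat 5 = 5 from rfl]
  generalize (List.filter (fun x => pvPrio x == 0) gaps).length = a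
  generalize (List.filter (fun x => pvPrio x == 1) gaps).length = b
  have h1 : 5 - min 5 a = 5 - a := by omega
  rw [h1, show 5 - (min 5 a + min (5 - a) b) = 5 - (a + b) from by omega]
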